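-- pv_equiv track=rewrite | github.com/pypi-data/pypi-mirror-325 | packages/flatpack/flatpack-3.13.49-py3-none-any.whl/flatpack/core/curlang.py | process_get_inner_block
-- ===== SOURCE A (Python) =====
-- import shlex
--
-- def process_get_inner_block(block):
--     success_cmds = []
--     failure_cmds = []
--
--     for cmd in block:
--         if not isinstance(cmd, dict):
--             raise ValueError(f"Expected dict in get inner block, got: {cmd}")
--
--         if cmd["type"] == "pass":
--             msg = shlex.quote(f'PASS: {cmd["message"]}')
--             success_cmds.append(f'echo {msg}')
--         elif cmd["type"] == "fail":
--             msg = shlex.quote(f'FAIL: {cmd["message"]}')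
--             failure_cmds.append(f'echo {msg}')
--         elif cmd["type"] == "print":
--             msg = shlex.quote(cmd["message"])
--             success_cmds.append(f'echo {msg}')
--         else:
--             unknown = shlex.quote(f'Unknown command type in get block: {cmd}')
--             success_cmds.append(f'echo {unknown}')
--             failure_cmds.append(f'echo {unknown}')
--     return ("\n".join(success_cmds), "\n".join(failure_cmds))
-- ===== SOURCE B (Python) =====
-- import string
--
-- # shlex.quote, re-implemented (shlex may not be imported here): safe chars are
-- # re.ASCII [\w@%+=:,./-]; otherwise wrap in single quotes, escaping embedded ones.
-- _SAFE = frozenset(string.ascii_letters + string.digits + "_@%+=:,./-")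
--
--
-- def _quote(s):
--     if not s:
--         return "''"
--     if all(c in _SAFE for c in s):
--         return s
--     return "'" + s.replace("'", "'\"'\"'") + "'"
--
--
-- def _entry(cmd):
--     """Validate one command and render it as a (tag, echo-string) entry."""
--     if not isinstance(cmd, dict):
--         raise ValueError(f"Expected dict in get inner block, got: {cmd}")
--     t = cmd["type"]
--     if t == "pass":
--         return ("success", f'echo {_quote("PASS: " + cmd["message"])}')
--     if t == "fail":
--         return ("failure", f'echo {_quote("FAIL: " + cmd["message"])}')
--     if t == "print":
--         return ("success", f'echo {_quote(cmd["message"])}')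
--     return ("both", f'echo {_quote("Unknown command type in get block: " + str(cmd))}')
--
--
-- def process_get_inner_block(block):
--     entries = [_entry(cmd) for cmd in block]
--     return (
--         "\n".join(e for tag, e in entries if tag != "failure"),
--         "\n".join(e for tag, e in entries if tag != "success"),
--     )
-- ===== Notes on version B (the rewrite author's own statement) =====
-- stated objective: alternative
-- what changed: B replaces A's branch-and-append into two accumulator lists by one validate-and-render pass producing tagged (tag, echo-string) entries, then builds the success and failure strings by two filtering passes over that intermediate list (the unknown case tagged 'both' lands in each).
import Mathlib
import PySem

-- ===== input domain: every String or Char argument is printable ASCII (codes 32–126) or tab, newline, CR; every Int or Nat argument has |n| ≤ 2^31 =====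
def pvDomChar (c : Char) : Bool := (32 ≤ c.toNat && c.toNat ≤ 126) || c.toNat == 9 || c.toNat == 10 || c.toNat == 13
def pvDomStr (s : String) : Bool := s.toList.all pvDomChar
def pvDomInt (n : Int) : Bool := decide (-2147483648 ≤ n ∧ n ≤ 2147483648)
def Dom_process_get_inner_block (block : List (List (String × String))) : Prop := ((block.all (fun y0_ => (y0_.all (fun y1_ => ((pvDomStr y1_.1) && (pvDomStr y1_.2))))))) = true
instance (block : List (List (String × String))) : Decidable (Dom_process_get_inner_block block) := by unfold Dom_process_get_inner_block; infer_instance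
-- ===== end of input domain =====

-- B builds one validated (tag, echo-string) entry per command and then partitions by two
-- filtering passes, instead of A's branch-and-append into two accumulators (objective: alternative).
-- Shared helpers below port the stdlib calls both Pythons make: shlex.quote and str(dict)/repr(str);
-- they are exact for strings over the Dom alphabet (printable ASCII plus tab/newline/CR).

-- characters shlex._find_unsafe treats as safe: [A-Za-z0-9_@%+=:,./-] (re.ASCII \w plus punctuation)
def pgibSafeChar (c : Char) : Bool :=
  ('a' ≤ c && c ≤ 'z') || ('A' ≤ c && c ≤ 'Z') || ('0' ≤ c && c ≤ '9') ||
  c == '_' || c == '@' || c == '%' || c == '+' || c == '=' || c == ':' ||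
  c == ',' || c == '.' || c == '/' || c == '-'

-- shlex.quote
def pgibShQuote (s : String) : String :=
  let cs := s.toList
  if cs.isEmpty then "''"
  else if cs.all pgibSafeChar then s
  else String.ofList ('\'' :: cs.flatMap (fun c => if c = '\'' then ['\'', '"', '\'', '"', '\''] else [c]) ++ ['\''])

-- repr(str): escapes for one character under chosen quote q (exact on the Dom alphabet)
def pgibEscape (q c : Char) : List Char :=
  if c = '\\' then ['\\', '\\']
  else if c = q then ['\\', q]
  else if c = '\t' then ['\\', 't']
  else if c = '\n' then ['\\', 'n']
  else if c = '\r' then ['\\', 'r']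
  else [c]

-- repr(str) (exact on the Dom alphabet): single quotes unless the string has ' and no "
def pgibRepr (s : String) : String :=
  let cs := s.toList
  let q : Char := if cs.contains '\'' && !(cs.contains '"') then '"' else '\''
  String.ofList (q :: cs.flatMap (pgibEscape q) ++ [q])

-- str(dict) for a dict of strings
def pgibStrDict (d : PySem.Dict String String) : String :=
  "{" ++ PySem.Str.join ", " (d.items.map (fun p => pgibRepr p.1 ++ ": " ++ pgibRepr p.2)) ++ "}"

-- ===== PORT A =====
def process_get_inner_block (block : List (List (String × String))) : String × String :=
  let acc := block.foldl
    (fun (acc : List String × List String) cmd =>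
      let d := PySem.Dict.ofList cmd
      if d.getD "type" "" = "pass" then
        (acc.1 ++ ["echo " ++ pgibShQuote ("PASS: " ++ d.getD "message" "")], acc.2)
      else if d.getD "type" "" = "fail" then
        (acc.1, acc.2 ++ ["echo " ++ pgibShQuote ("FAIL: " ++ d.getD "message" "")])
      else if d.getD "type" "" = "print" then
        (acc.1 ++ ["echo " ++ pgibShQuote (d.getD "message" "")], acc.2)
      else
        let u := "echo " ++ pgibShQuote ("Unknown command type in get block: " ++ pgibStrDict d)
        (acc.1 ++ [u], acc.2 ++ [u]))
    ([], [])
  (PySem.Str.join "\n" acc.1, PySem.Str.join "\n" acc.2)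

-- ===== PORT B =====
-- _entry: one command → (tag, echo-string)
def pgibEntry (cmd : List (String × String)) : String × String :=
  let d := PySem.Dict.ofList cmd
  let t := d.getD "type" ""
  if t = "pass" then ("success", "echo " ++ pgibShQuote ("PASS: " ++ d.getD "message" ""))
  else if t = "fail" then ("failure", "echo " ++ pgibShQuote ("FAIL: " ++ d.getD "message" ""))
  else if t = "print" then ("success", "echo " ++ pgibShQuote (d.getD "message" ""))
  else ("both", "echo " ++ pgibShQuote ("Unknown command type in get block: " ++ pgibStrDict d))

def process_get_inner_block_alt (block : List (List (String × String))) : String × String :=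
  let entries := block.map pgibEntry
  (PySem.Str.join "\n" ((entries.filter (fun e => e.1 ≠ "failure")).map Prod.snd),
   PySem.Str.join "\n" ((entries.filter (fun e => e.1 ≠ "success")).map Prod.snd))

-- ===== PRECONDITION & SPEC =====
-- Pre_ excludes exactly the inputs on which the Python A raises KeyError: a command whose dict
-- has no "type" key, or a "pass"/"fail"/"print" command with no "message" key.
def Pre_process_get_inner_block (block : List (List (String × String))) : Prop :=
  ∀ cmd ∈ block,
    (PySem.Dict.ofList cmd).contains "type" = true ∧
    ((PySem.Dict.ofList cmd).getD "type" "" = "pass" ∨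
     (PySem.Dict.ofList cmd).getD "type" "" = "fail" ∨
     (PySem.Dict.ofList cmd).getD "type" "" = "print" →
       (PySem.Dict.ofList cmd).contains "message" = true)
instance (block : List (List (String × String))) : Decidable (Pre_process_get_inner_block block) := by
  unfold Pre_process_get_inner_block; infer_instance

def pvWitness_process_get_inner_block : (List (List (String × String))) :=
  [[("type", "pass"), ("message", "hello world")], [("type", "mystery")]]

def Spec_process_get_inner_block (block : List (List (String × String))) (out : String × String) : Prop := out = process_get_inner_block_alt block
instance (block : List (List (String × String))) (out : String × String) : Decidable (Spec_process_get_inner_block block out) := by unfold Spec_process_get_inner_block; infer_instance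

-- ===== CLAIM (what is proved, stated in full; the proofs are below) =====
def Claim_equal_process_get_inner_block : Prop := ∀ (block : List (List (String × String))), Dom_process_get_inner_block block → Pre_process_get_inner_block block → Spec_process_get_inner_block block (process_get_inner_block block)

-- ===== LEMMAS AND PROOFS =====

-- loop invariant: A's fold over the block appends exactly B's two filtered projections
lemma pgib_loop (block : List (List (String × String))) :
    ∀ s f : List String,
      block.foldl
        (fun (acc : List String × List String) cmd =>
          let d := PySem.Dict.ofList cmd
          if d.getD "type" "" = "pass" then
            (acc.1 ++ ["echo " ++ pgibShQuote ("PASS: " ++ d.getD "message" "")], acc.2)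
          else if d.getD "type" "" = "fail" then
            (acc.1, acc.2 ++ ["echo " ++ pgibShQuote ("FAIL: " ++ d.getD "message" "")])
          else if d.getD "type" "" = "print" then
            (acc.1 ++ ["echo " ++ pgibShQuote (d.getD "message" "")], acc.2)
          else
            let u := "echo " ++ pgibShQuote ("Unknown command type in get block: " ++ pgibStrDict d)
            (acc.1 ++ [u], acc.2 ++ [u]))
        (s, f)
      = (s ++ ((block.map pgibEntry).filter (fun e => e.1 ≠ "failure")).map Prod.snd,
         f ++ ((block.map pgibEntry).filter (fun e => e.1 ≠ "success")).map Prod.snd) := by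
  induction block with
  | nil => simp
  | cons cmd rest ih =>
    intro s f
    simp only [List.foldl_cons, List.map_cons, List.filter_cons, pgibEntry]
    split_ifs with h1 h2 h3 <;> simp_all

-- ===== VERDICT (by name: the statement is the Claim_ definition above) =====
theorem process_get_inner_block_spec : Claim_equal_process_get_inner_block := by
  intro block _ _
  unfold Spec_process_get_inner_block process_get_inner_block process_get_inner_block_alt
  rw [pgib_loop block [] []]
  simp
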